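-- pv_equiv track=rewrite | github.com/k-hanafi/ai-startups-taxonomy-research | src/website_evidence.py | _page_kind
-- ===== SOURCE A (Python) =====
-- def _page_kind(url: str) -> str:
--     lower = url.lower()
--     if any(part in lower for part in ("/product", "/platform", "/solution", "/use-case")):
--         return "product"
--     if any(part in lower for part in ("/about", "/company", "/team")):
--         return "about"
--     if any(part in lower for part in ("/career", "/jobs", "/hiring")):
--         return "careers"
--     if any(part in lower for part in ("/research", "/technology", "/ai", "/ml")):
--         return "technical"
--     return "homepage_or_other"
-- ===== SOURCE B (Python) =====
-- _CATEGORIES = [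
--     (("/product", "/platform", "/solution", "/use-case"), 0),
--     (("/about", "/company", "/team"), 1),
--     (("/career", "/jobs", "/hiring"), 2),
--     (("/research", "/technology", "/ai", "/ml"), 3),
-- ]
-- _LABELS = ("product", "about", "careers", "technical", "homepage_or_other")
--
--
-- def _page_kind(url: str) -> str:
--     # Single left-to-right scan: at every '/' test which keyword groups match as a
--     # prefix of the remaining tail, keeping the best (smallest) priority seen.
--     lower = url.lower()
--     best = 4
--     for i, ch in enumerate(lower):
--         if ch == "/":
--             tail = lower[i:]
--             for kws, pri in _CATEGORIES:
--                 if any(tail.startswith(k) for k in kws):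
--                     best = min(best, pri)
--     return _LABELS[best]
-- ===== Notes on version B (the rewrite author's own statement) =====
-- stated objective: alternative
-- what changed: Instead of four sequential per-category whole-string substring searches, B makes a single left-to-right scan of the lowered URL and, at each slash character, tests the keyword groups as prefixes of the remaining tail, keeping the minimum category priority in an accumulator; the label is looked up from that priority at the end.
import Mathlib
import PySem

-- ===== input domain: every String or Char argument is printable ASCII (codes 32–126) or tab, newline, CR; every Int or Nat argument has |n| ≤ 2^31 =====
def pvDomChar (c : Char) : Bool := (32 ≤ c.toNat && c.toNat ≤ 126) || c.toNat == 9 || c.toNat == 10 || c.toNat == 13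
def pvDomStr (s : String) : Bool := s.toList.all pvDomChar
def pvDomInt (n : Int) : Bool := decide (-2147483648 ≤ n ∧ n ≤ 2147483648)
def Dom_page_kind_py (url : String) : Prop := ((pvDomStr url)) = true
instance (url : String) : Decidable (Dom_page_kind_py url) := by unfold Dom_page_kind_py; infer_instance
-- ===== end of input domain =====

-- B replaces A's four sequential whole-string substring searches by ONE left-to-right scan of the URL: at each slash it tests the keyword groups as prefixes of the tail and keeps the minimum priority (alternative decomposition; same cost).


-- ===== PORT A =====
def page_kind_py (url : String) : String :=
  let lower := PySem.Str.lower url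
  if ["/product", "/platform", "/solution", "/use-case"].any (fun part => PySem.Str.isIn part lower) then
    "product"
  else if ["/about", "/company", "/team"].any (fun part => PySem.Str.isIn part lower) then
    "about"
  else if ["/career", "/jobs", "/hiring"].any (fun part => PySem.Str.isIn part lower) then
    "careers"
  else if ["/research", "/technology", "/ai", "/ml"].any (fun part => PySem.Str.isIn part lower) then
    "technical"
  else
    "homepage_or_other"

-- ===== PORT B =====  (Source B: one scan over the characters; at each slash the inner loop
-- over _CATEGORIES lowers `best` to the priority of any group whose keyword is a prefix of the tail)
def pvCats : List (List (List Char) × Nat) :=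
  [(["/product".toList, "/platform".toList, "/solution".toList, "/use-case".toList], 0),
   (["/about".toList, "/company".toList, "/team".toList], 1),
   (["/career".toList, "/jobs".toList, "/hiring".toList], 2),
   (["/research".toList, "/technology".toList, "/ai".toList, "/ml".toList], 3)]

-- the inner `for kws, pri in _CATEGORIES` loop, on tail `s`
def pvUpdate (s : List Char) (best : Nat) : Nat :=
  pvCats.foldl (fun b kp => if kp.1.any (fun k => PySem.Chars.startswith s k) then min b kp.2 else b) best

-- the outer `for i, ch in enumerate(lower)` loop; the current tail `lower[i:]` is the list being recursed on
def pvScan : List Char → Nat → Nat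
  | [], best => best
  | c :: rest, best => pvScan rest (if c = '/' then pvUpdate (c :: rest) best else best)

-- `_LABELS[best]` on the five-element tuple
def pvLabel : Nat → String
  | 0 => "product"
  | 1 => "about"
  | 2 => "careers"
  | 3 => "technical"
  | _ => "homepage_or_other"

def page_kind_py_alt (url : String) : String :=
  pvLabel (pvScan (PySem.Str.lower url).toList 4)

-- ===== PRECONDITION & SPEC =====
def Spec_page_kind_py (url : String) (out : String) : Prop := out = page_kind_py_alt url
instance (url : String) (out : String) : Decidable (Spec_page_kind_py url out) := by unfold Spec_page_kind_py; infer_instance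

-- ===== CLAIM (what is proved, stated in full; the proofs are below) =====
def Claim_equal_page_kind_py : Prop := ∀ (url : String), Dom_page_kind_py url → Spec_page_kind_py url (page_kind_py url)

-- ===== LEMMAS AND PROOFS =====

-- prefix hit of category j on tail s
def pvP0 (s : List Char) : Bool :=
  PySem.Chars.startswith s "/product".toList || PySem.Chars.startswith s "/platform".toList ||
  PySem.Chars.startswith s "/solution".toList || PySem.Chars.startswith s "/use-case".toList
def pvP1 (s : List Char) : Bool :=
  PySem.Chars.startswith s "/about".toList || PySem.Chars.startswith s "/company".toList ||
  PySem.Chars.startswith s "/team".toList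
def pvP2 (s : List Char) : Bool :=
  PySem.Chars.startswith s "/career".toList || PySem.Chars.startswith s "/jobs".toList ||
  PySem.Chars.startswith s "/hiring".toList
def pvP3 (s : List Char) : Bool :=
  PySem.Chars.startswith s "/research".toList || PySem.Chars.startswith s "/technology".toList ||
  PySem.Chars.startswith s "/ai".toList || PySem.Chars.startswith s "/ml".toList

-- substring hit of category j anywhere in l (A's condition, at the Chars level)
def pvA0 (l : List Char) : Bool :=
  PySem.Chars.isIn "/product".toList l || PySem.Chars.isIn "/platform".toList l ||
  PySem.Chars.isIn "/solution".toList l || PySem.Chars.isIn "/use-case".toList l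
def pvA1 (l : List Char) : Bool :=
  PySem.Chars.isIn "/about".toList l || PySem.Chars.isIn "/company".toList l ||
  PySem.Chars.isIn "/team".toList l
def pvA2 (l : List Char) : Bool :=
  PySem.Chars.isIn "/career".toList l || PySem.Chars.isIn "/jobs".toList l ||
  PySem.Chars.isIn "/hiring".toList l
def pvA3 (l : List Char) : Bool :=
  PySem.Chars.isIn "/research".toList l || PySem.Chars.isIn "/technology".toList l ||
  PySem.Chars.isIn "/ai".toList l || PySem.Chars.isIn "/ml".toList l

theorem pvUpdate_char (s : List Char) :
    pvUpdate s 4 = if pvP0 s then 0 else if pvP1 s then 1 else if pvP2 s then 2 else if pvP3 s then 3 else 4 := by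
  simp only [pvUpdate, pvCats, List.foldl, List.any, pvP0, pvP1, pvP2, pvP3]
  split_ifs <;> simp_all

theorem pvFoldl_min_split (t : List (List (List Char) × Nat)) (s : List Char) (b1 b2 : Nat) :
    t.foldl (fun b kp => if kp.1.any (fun k => PySem.Chars.startswith s k) then min b kp.2 else b) (min b1 b2)
      = min b1 (t.foldl (fun b kp => if kp.1.any (fun k => PySem.Chars.startswith s k) then min b kp.2 else b) b2) := by
  induction t generalizing b2 with
  | nil => rfl
  | cons kp t ih =>
    simp only [List.foldl]
    by_cases h : kp.1.any (fun k => PySem.Chars.startswith s k) = true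
    · rw [if_pos h, if_pos h, Nat.min_assoc]
      exact ih _
    · rw [if_neg h, if_neg h]
      exact ih _

theorem pvUpdate_min (s : List Char) (b : Nat) (hb : b ≤ 4) :
    pvUpdate s b = min b (pvUpdate s 4) := by
  rw [pvUpdate, pvUpdate, ← pvFoldl_min_split]
  congr 1
  omega

theorem pvUpdate_le (s : List Char) : pvUpdate s 4 ≤ 4 := by
  rw [pvUpdate_char]; split_ifs <;> omega

-- spec-side accumulator-free form of the scan
def pvS : List Char → Nat
  | [] => 4
  | c :: rest => min (if c = '/' then pvUpdate (c :: rest) 4 else 4) (pvS rest)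

theorem pvS_le (l : List Char) : pvS l ≤ 4 := by
  induction l with
  | nil => simp [pvS]
  | cons c rest ih => simp only [pvS]; omega

theorem pvScan_eq (l : List Char) : ∀ b, b ≤ 4 → pvScan l b = min b (pvS l) := by
  induction l with
  | nil => intro b hb; simp only [pvScan, pvS]; omega
  | cons c rest ih =>
    intro b hb
    simp only [pvScan, pvS]
    by_cases hc : c = '/'
    · rw [if_pos hc, if_pos hc, pvUpdate_min _ _ hb,
        ih _ (by have := pvUpdate_le (c :: rest); omega)]
      omega
    · rw [if_neg hc, if_neg hc, ih _ hb]
      omega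

theorem pvIsIn_cons (kw : List Char) (c : Char) (rest : List Char) :
    PySem.Chars.isIn kw (c :: rest) = (PySem.Chars.startswith (c :: rest) kw || PySem.Chars.isIn kw rest) := by
  rw [Bool.eq_iff_iff]
  simp [PySem.Chars.isIn_iff_infix, List.infix_cons_iff, PySem.Chars.startswith_iff]

theorem pvSw_false {c : Char} (rest : List Char) (hc : c ≠ '/') (kw : List Char)
    (hkw : kw.head? = some '/') : PySem.Chars.startswith (c :: rest) kw = false := by
  rw [Bool.eq_false_iff]
  intro h
  rw [PySem.Chars.startswith_iff] at h
  cases kw with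
  | nil => simp at hkw
  | cons k t =>
    obtain ⟨u, hu⟩ := h
    have hk : k = '/' := by simpa using hkw
    have hkc : k = c := by injection hu
    exact hc (hkc ▸ hk)

-- or-interleaving facts used to split a category hit on c::rest into prefix-hit-now or hit-in-rest
theorem pvOr4 : ∀ (s0 i0 s1 i1 s2 i2 s3 i3 : Bool),
    ((s0 || i0) || (s1 || i1) || (s2 || i2) || (s3 || i3))
      = ((s0 || s1 || s2 || s3) || (i0 || i1 || i2 || i3)) := by decide

theorem pvOr3 : ∀ (s0 i0 s1 i1 s2 i2 : Bool),
    ((s0 || i0) || (s1 || i1) || (s2 || i2)) = ((s0 || s1 || s2) || (i0 || i1 || i2)) := by decide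

-- the per-step merge of the prefix-hit priority with the best of the rest, as a pure Bool/Nat fact
theorem pvMinIf : ∀ (p0 p1 p2 p3 a0 a1 a2 a3 : Bool),
    min (if p0 then 0 else if p1 then 1 else if p2 then 2 else if p3 then 3 else (4 : Nat))
        (if a0 then 0 else if a1 then 1 else if a2 then 2 else if a3 then 3 else 4)
      = if p0 || a0 then 0 else if p1 || a1 then 1 else if p2 || a2 then 2 else
          if p3 || a3 then 3 else 4 := by decide

theorem pvS_spec (l : List Char) :
    pvS l = if pvA0 l then 0 else if pvA1 l then 1 else if pvA2 l then 2 else if pvA3 l then 3 else 4 := by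
  induction l with
  | nil => decide
  | cons c rest ih =>
    have h0 : pvA0 (c :: rest) = (pvP0 (c :: rest) || pvA0 rest) := by
      simp only [pvA0, pvP0, pvIsIn_cons]; exact pvOr4 _ _ _ _ _ _ _ _
    have h1 : pvA1 (c :: rest) = (pvP1 (c :: rest) || pvA1 rest) := by
      simp only [pvA1, pvP1, pvIsIn_cons]; exact pvOr3 _ _ _ _ _ _
    have h2 : pvA2 (c :: rest) = (pvP2 (c :: rest) || pvA2 rest) := by
      simp only [pvA2, pvP2, pvIsIn_cons]; exact pvOr3 _ _ _ _ _ _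
    have h3 : pvA3 (c :: rest) = (pvP3 (c :: rest) || pvA3 rest) := by
      simp only [pvA3, pvP3, pvIsIn_cons]; exact pvOr4 _ _ _ _ _ _ _ _
    by_cases hc : c = '/'
    · simp only [pvS, if_pos hc, pvUpdate_char, ih, h0, h1, h2, h3]
      exact pvMinIf _ _ _ _ _ _ _ _
    · have hp0 : pvP0 (c :: rest) = false := by
        simp only [pvP0, Bool.or_eq_false_iff]
        exact ⟨⟨⟨pvSw_false rest hc _ (by decide), pvSw_false rest hc _ (by decide)⟩,
          pvSw_false rest hc _ (by decide)⟩, pvSw_false rest hc _ (by decide)⟩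
      have hp1 : pvP1 (c :: rest) = false := by
        simp only [pvP1, Bool.or_eq_false_iff]
        exact ⟨⟨pvSw_false rest hc _ (by decide), pvSw_false rest hc _ (by decide)⟩,
          pvSw_false rest hc _ (by decide)⟩
      have hp2 : pvP2 (c :: rest) = false := by
        simp only [pvP2, Bool.or_eq_false_iff]
        exact ⟨⟨pvSw_false rest hc _ (by decide), pvSw_false rest hc _ (by decide)⟩,
          pvSw_false rest hc _ (by decide)⟩
      have hp3 : pvP3 (c :: rest) = false := by
        simp only [pvP3, Bool.or_eq_false_iff]
        exact ⟨⟨⟨pvSw_false rest hc _ (by decide), pvSw_false rest hc _ (by decide)⟩,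
          pvSw_false rest hc _ (by decide)⟩, pvSw_false rest hc _ (by decide)⟩
      simp only [pvS, if_neg hc, ih, h0, h1, h2, h3, hp0, hp1, hp2, hp3, Bool.false_or]
      split_ifs <;> omega

-- ===== VERDICT (by name: the statement is the Claim_ definition above) =====
theorem page_kind_py_spec : Claim_equal_page_kind_py := by
  intro url _
  unfold Spec_page_kind_py page_kind_py page_kind_py_alt
  rw [pvScan_eq _ 4 (by omega)]
  have h4 := pvS_le (PySem.Str.lower url).toList
  rw [Nat.min_eq_right h4, pvS_spec]
  simp only [pvA0, pvA1, pvA2, pvA3, List.any_cons, List.any_nil, PySem.Str.isIn_eq,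
    Bool.or_false, Bool.or_assoc]
  split_ifs <;> rfl
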